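-- pv_equiv track=rewrite | github.com/Kai-codin/TransportStatistics | Depatures/api.py | _readable_days
-- ===== SOURCE A (Python) =====
-- from typing import Optional
--
-- def _readable_days(mask: str) -> Optional[str]:
--     if not mask:
--         return None
--     s = str(mask).strip()
--     if not s:
--         return None
--     s = s[:7].ljust(7, "0") if len(s) >= 7 else s.zfill(7)
--     days = ["Monday", "Tuesday", "Wednesday", "Thursday", "Friday", "Saturday", "Sunday"]
--     picked = [days[i] for i, ch in enumerate(s) if ch == "1"]
--     if not picked:
--         return None
--     if len(picked) == 7:
--         return "Daily"
--     idxs = [i for i, ch in enumerate(s) if ch == "1"]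
--     if len(idxs) > 1 and max(idxs) - min(idxs) + 1 == len(idxs):
--         return f"{days[min(idxs)]} to {days[max(idxs)]}"
--     return ", ".join(picked)
-- ===== SOURCE B (Python) =====
-- from typing import Optional
--
-- def _readable_days(mask: str) -> Optional[str]:
--     if not mask:
--         return None
--     s = str(mask).strip()
--     if not s:
--         return None
--     s = s[:7] if len(s) >= 7 else s.zfill(7)
--     days = ["Monday", "Tuesday", "Wednesday", "Thursday", "Friday", "Saturday", "Sunday"]
--     flags = [ch == "1" for ch in s]
--     runs = []  # maximal runs of consecutive selected days, as [start, end]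
--     for i, f in enumerate(flags):
--         if f:
--             if runs and runs[-1][1] == i - 1:
--                 runs[-1][1] = i
--             else:
--                 runs.append([i, i])
--     if not runs:
--         return None
--     if sum(e - b + 1 for b, e in runs) == 7:
--         return "Daily"
--     if len(runs) == 1 and runs[0][1] > runs[0][0]:
--         return f"{days[runs[0][0]]} to {days[runs[0][1]]}"
--     return ", ".join(days[i] for i, f in enumerate(flags) if f)
-- ===== Notes on version B (the rewrite author's own statement) =====
-- stated objective: alternative
-- what changed: Replaces A's two enumerate-filter passes plus min/max contiguity arithmetic with a single left-to-right run-scan that groups consecutive selected days into runs and decides Daily/range/join from the run list.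
import Mathlib
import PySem

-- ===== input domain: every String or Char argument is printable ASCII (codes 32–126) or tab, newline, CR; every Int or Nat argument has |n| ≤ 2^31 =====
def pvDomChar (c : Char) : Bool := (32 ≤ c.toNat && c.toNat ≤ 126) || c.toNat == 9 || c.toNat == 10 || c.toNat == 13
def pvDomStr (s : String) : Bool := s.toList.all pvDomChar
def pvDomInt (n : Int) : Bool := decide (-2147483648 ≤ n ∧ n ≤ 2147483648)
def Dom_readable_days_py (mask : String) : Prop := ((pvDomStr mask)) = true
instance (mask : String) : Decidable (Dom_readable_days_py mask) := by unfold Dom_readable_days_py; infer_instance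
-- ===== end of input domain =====

-- B replaces A's min/max contiguity arithmetic with a single run-scan over the 7 flags; same results.

-- ===== PORT A =====
-- shared data table (the Python `days` list, as char lists)
def pyDays : List (List Char) :=
  [['M','o','n','d','a','y'], ['T','u','e','s','d','a','y'], ['W','e','d','n','e','s','d','a','y'],
   ['T','h','u','r','s','d','a','y'], ['F','r','i','d','a','y'], ['S','a','t','u','r','d','a','y'],
   ['S','u','n','d','a','y']]

-- s[:7].ljust(7, "0") : exact for the use here (fill char '0', pad on the right)
def pyLjust (cs : List Char) (w : Nat) (fill : Char) : List Char :=
  cs ++ List.replicate (w - cs.length) fill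

-- A's code from `days = …` on, applied to the normalized string s (port is step for step)
def pyACore (s : List Char) : Option String :=
  let picked := (PySem.List.enumerate s).filterMap
    (fun p => if p.2 = '1' then some ((PySem.List.pyGet? pyDays p.1).getD []) else none)
  if picked = [] then none
  else if picked.length = 7 then some "Daily"
  else
    let idxs := (PySem.List.enumerate s).filterMap
      (fun p => if p.2 = '1' then some p.1 else none)
    let mn := (PySem.List.min? idxs (fun i => i)).getD 0
    let mx := (PySem.List.max? idxs (fun i => i)).getD 0
    if 1 < idxs.length ∧ mx - mn + 1 = (idxs.length : Int) then
      some (String.ofList ((PySem.List.pyGet? pyDays mn).getD [] ++ [' ','t','o',' '] ++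
                           (PySem.List.pyGet? pyDays mx).getD []))
    else some (String.ofList (PySem.Chars.join [',',' '] picked))

def readable_days_py (mask : String) : Option String :=
  if mask.toList = [] then none
  else
    let s := PySem.Chars.strip mask.toList
    if s = [] then none
    else
      let s := if 7 ≤ s.length then pyLjust (PySem.List.slice s none (some 7)) 7 '0'
               else PySem.Chars.zfill s 7
      pyACore s

-- ===== PORT B =====
-- B's code from `days = …` on (run-scan); runs are accumulated front-first and reversed,
-- transliterating Python's append-at-end / update-last loop.
def pyBCore (s : List Char) : Option String :=
  let flags := s.map (fun ch => decide (ch = '1'))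
  let runs := ((PySem.List.enumerate flags).foldl
    (fun acc p =>
      if p.2 then
        match acc with
        | (b, e) :: rest => if e = p.1 - 1 then (b, p.1) :: rest else (p.1, p.1) :: (b, e) :: rest
        | [] => [(p.1, p.1)]
      else acc) []).reverse
  if runs = [] then none
  else if runs.foldl (fun t r => t + (r.2 - r.1 + 1)) 0 = (7 : Int) then some "Daily"
  else
    let joined : Option String := some (String.ofList (PySem.Chars.join [',',' ']
      ((PySem.List.enumerate flags).filterMap
        (fun p => if p.2 then some ((PySem.List.pyGet? pyDays p.1).getD []) else none))))
    match runs with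
    | [(b, e)] =>
        if b < e then
          some (String.ofList ((PySem.List.pyGet? pyDays b).getD [] ++ [' ','t','o',' '] ++
                               (PySem.List.pyGet? pyDays e).getD []))
        else joined
    | _ => joined

def readable_days_py_alt (mask : String) : Option String :=
  if mask.toList = [] then none
  else
    let s := PySem.Chars.strip mask.toList
    if s = [] then none
    else
      let s := if 7 ≤ s.length then PySem.List.slice s none (some 7)
               else PySem.Chars.zfill s 7
      pyBCore s

-- ===== PRECONDITION & SPEC =====
def Spec_readable_days_py (mask : String) (out : Option String) : Prop := out = readable_days_py_alt mask
instance (mask : String) (out : Option String) : Decidable (Spec_readable_days_py mask out) := by unfold Spec_readable_days_py; infer_instance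

-- ===== CLAIM (what is proved, stated in full; the proofs are below) =====
def Claim_equal_readable_days_py : Prop := ∀ (mask : String), Dom_readable_days_py mask → Spec_readable_days_py mask (readable_days_py mask)

-- ===== LEMMAS AND PROOFS =====

-- canonicalization: both cores only look at whether each char is '1'
def pyCanonChar (c : Char) : Char := if c = '1' then '1' else '0'

theorem canonChar01 (c : Char) : pyCanonChar c = '0' ∨ pyCanonChar c = '1' := by
  unfold pyCanonChar; by_cases h : c = '1' <;> simp [h]

theorem enumerate_map {α β : Type} (f : α → β) (s : List α) (k : Int) :
    PySem.List.enumerate (s.map f) k = (PySem.List.enumerate s k).map (fun p => (p.1, f p.2)) := by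
  induction s generalizing k with
  | nil => simp [PySem.List.enumerate_nil]
  | cons x xs ih => simp [PySem.List.enumerate_cons, ih]

theorem filterMap_canon {β : Type} (s : List Char) (g : Int → Option β) :
    (PySem.List.enumerate (s.map pyCanonChar) 0).filterMap
        (fun p => if p.2 = '1' then g p.1 else none)
  = (PySem.List.enumerate s 0).filterMap
        (fun p => if p.2 = '1' then g p.1 else none) := by
  rw [enumerate_map, List.filterMap_map]
  congr 1
  funext p
  by_cases h : p.2 = '1' <;> simp [pyCanonChar, h, Function.comp]

theorem filterMap_canon_pick (s : List Char) :
    (PySem.List.enumerate (s.map pyCanonChar) 0).filterMap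
        (fun p => if p.2 = '1' then some ((PySem.List.pyGet? pyDays p.1).getD []) else none)
  = (PySem.List.enumerate s 0).filterMap
        (fun p => if p.2 = '1' then some ((PySem.List.pyGet? pyDays p.1).getD []) else none) :=
  filterMap_canon s (fun i => some ((PySem.List.pyGet? pyDays i).getD []))

theorem filterMap_canon_idx (s : List Char) :
    (PySem.List.enumerate (s.map pyCanonChar) 0).filterMap
        (fun p => if p.2 = '1' then some p.1 else none)
  = (PySem.List.enumerate s 0).filterMap
        (fun p => if p.2 = '1' then some p.1 else none) :=
  filterMap_canon s (fun i => some i)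

theorem coreA_canon (s : List Char) : pyACore (s.map pyCanonChar) = pyACore s := by
  simp only [pyACore, filterMap_canon_pick, filterMap_canon_idx]

theorem flags_canon (s : List Char) :
    (s.map pyCanonChar).map (fun ch => decide (ch = '1')) = s.map (fun ch => decide (ch = '1')) := by
  rw [List.map_map]
  congr 1
  funext c
  by_cases h : c = '1' <;> simp [pyCanonChar, h, Function.comp]

theorem coreB_canon (s : List Char) : pyBCore (s.map pyCanonChar) = pyBCore s := by
  simp only [pyBCore, flags_canon]

theorem core01 (d0 d1 d2 d3 d4 d5 d6 : Char)
    (h0 : d0 = '0' ∨ d0 = '1') (h1 : d1 = '0' ∨ d1 = '1') (h2 : d2 = '0' ∨ d2 = '1')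
    (h3 : d3 = '0' ∨ d3 = '1') (h4 : d4 = '0' ∨ d4 = '1') (h5 : d5 = '0' ∨ d5 = '1')
    (h6 : d6 = '0' ∨ d6 = '1') :
    pyACore [d0, d1, d2, d3, d4, d5, d6] = pyBCore [d0, d1, d2, d3, d4, d5, d6] := by
  rcases h0 with h0 | h0 <;> rcases h1 with h1 | h1 <;> rcases h2 with h2 | h2 <;>
    rcases h3 with h3 | h3 <;> rcases h4 with h4 | h4 <;> rcases h5 with h5 | h5 <;>
    rcases h6 with h6 | h6 <;> subst h0 h1 h2 h3 h4 h5 h6 <;> decide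

theorem core_eq (s : List Char) (h : s.length = 7) : pyACore s = pyBCore s := by
  match s, h with
  | [c0, c1, c2, c3, c4, c5, c6], _ =>
    rw [← coreA_canon, ← coreB_canon]
    exact core01 _ _ _ _ _ _ _ (canonChar01 c0) (canonChar01 c1) (canonChar01 c2)
      (canonChar01 c3) (canonChar01 c4) (canonChar01 c5) (canonChar01 c6)

theorem length_norm (s : List Char) :
    (if 7 ≤ s.length then PySem.List.slice s none (some 7) else PySem.Chars.zfill s 7).length = 7 := by
  split
  · rw [show ((7 : Int) = ((7 : Nat) : Int)) from rfl, PySem.List.slice_to_natCast]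
    simp; omega
  · rw [PySem.Chars.length_zfill]; omega

theorem ljust_eq (s : List Char) (h : 7 ≤ s.length) :
    pyLjust (PySem.List.slice s none (some 7)) 7 '0' = PySem.List.slice s none (some 7) := by
  have hl : (PySem.List.slice s none (some 7)).length = 7 := by
    rw [show ((7 : Int) = ((7 : Nat) : Int)) from rfl, PySem.List.slice_to_natCast]
    simp; omega
  simp [pyLjust, hl]

-- ===== VERDICT (by name: the statement is the Claim_ definition above) =====
theorem readable_days_py_spec : Claim_equal_readable_days_py := by
  intro mask _
  unfold Spec_readable_days_py readable_days_py readable_days_py_alt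
  by_cases hm : mask.toList = []
  · simp [hm]
  · simp only [hm, ite_false]
    by_cases hs : PySem.Chars.strip mask.toList = []
    · simp [hs]
    · simp only [hs, ite_false]
      set s := PySem.Chars.strip mask.toList with hsdef
      have hnorm : (if 7 ≤ s.length then pyLjust (PySem.List.slice s none (some 7)) 7 '0'
                    else PySem.Chars.zfill s 7)
                 = (if 7 ≤ s.length then PySem.List.slice s none (some 7)
                    else PySem.Chars.zfill s 7) := by
        split
        · exact ljust_eq s (by omega)
        · rfl
      rw [hnorm]
      exact core_eq _ (length_norm s)
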